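-- pv_equiv track=rewrite | github.com/stephenHahn88/sentiment_tool | data/organize_schubert_data_by_harmony.py | getDiatonicSteps
-- ===== SOURCE A (Python) =====
-- diatonicPitchClasses = {
--     n: i for i, n in enumerate(list("CDEFGAB"))
-- }
--
-- def getDiatonicSteps(tonic, toNote):
--     n1 = tonic[0]
--     n2 = toNote[0]
--     dpc1 = diatonicPitchClasses[n1]
--     dpc2 = diatonicPitchClasses[n2]
--     count = 0
--     while dpc2 != dpc1:
--         count += 1
--         dpc1 = (dpc1 + 1) % 7
--     return count + 1
-- ===== SOURCE B (Python) =====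
-- diatonicPitchClasses = {
--     n: i for i, n in enumerate(list("CDEFGAB"))
-- }
--
-- def getDiatonicSteps(tonic, toNote):
--     n1 = tonic[0]
--     n2 = toNote[0]
--     dpc1 = diatonicPitchClasses[n1]
--     dpc2 = diatonicPitchClasses[n2]
--     return (dpc2 - dpc1) % 7 + 1
-- ===== Notes on version B (the rewrite author's own statement) =====
-- stated objective: simpler
-- what changed: replaces the counting while-loop over pitch classes with the closed-form modular distance (dpc2 - dpc1) % 7 + 1
import Mathlib
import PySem

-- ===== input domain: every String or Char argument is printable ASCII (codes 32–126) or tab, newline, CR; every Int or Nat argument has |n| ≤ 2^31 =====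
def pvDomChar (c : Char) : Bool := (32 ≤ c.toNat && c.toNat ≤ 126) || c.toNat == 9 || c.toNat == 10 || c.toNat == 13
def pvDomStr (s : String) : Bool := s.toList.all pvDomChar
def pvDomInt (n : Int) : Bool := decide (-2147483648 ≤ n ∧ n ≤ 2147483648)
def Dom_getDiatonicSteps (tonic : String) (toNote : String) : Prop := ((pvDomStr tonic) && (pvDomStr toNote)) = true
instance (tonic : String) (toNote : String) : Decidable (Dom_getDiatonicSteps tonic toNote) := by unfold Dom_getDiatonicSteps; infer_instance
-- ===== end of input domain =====

-- B replaces A's counting while-loop with the closed-form modular distance (dpc2 - dpc1) % 7 + 1 (simpler).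

-- ===== PORT A =====
-- module-level dict {n: i for i, n in enumerate(list("CDEFGAB"))}
def diatonicPitchClassesDict : PySem.Dict Char Int :=
  PySem.Dict.ofList ((PySem.List.enumerate ("CDEFGAB".toList)).map (fun p => (p.2, p.1)))

-- the while-loop: dpc1, dpc2 ∈ [0,7) so it terminates within 7 steps; fuel 7 is only a totality guard
def getDiatonicStepsLoop (fuel : Nat) (dpc1 dpc2 count : Int) : Int :=
  match fuel with
  | 0 => count
  | f + 1 =>
    if dpc2 ≠ dpc1 then getDiatonicStepsLoop f (PySem.Int.mod (dpc1 + 1) 7) dpc2 (count + 1)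
    else count

def getDiatonicSteps (tonic : String) (toNote : String) : Int :=
  match PySem.Str.pyGet? tonic 0, PySem.Str.pyGet? toNote 0 with
  | some n1, some n2 =>
    match diatonicPitchClassesDict.get? n1, diatonicPitchClassesDict.get? n2 with
    | some dpc1, some dpc2 => getDiatonicStepsLoop 7 dpc1 dpc2 0 + 1
    | _, _ => 0   -- KeyError: excluded by Pre_
  | _, _ => 0     -- IndexError: excluded by Pre_

-- ===== PORT B =====
-- B's own copy of the module-level dict (same comprehension as in Source B)
def diatonicPitchClassesDictB : PySem.Dict Char Int :=
  PySem.Dict.ofList ((PySem.List.enumerate ("CDEFGAB".toList)).map (fun p => (p.2, p.1)))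

-- straight-line lookups as in Source B; any IndexError/KeyError (none) yields the default 0, excluded by Pre_
def getDiatonicSteps_alt (tonic : String) (toNote : String) : Int :=
  (((PySem.Str.pyGet? tonic 0).bind fun n1 =>
    (PySem.Str.pyGet? toNote 0).bind fun n2 =>
    (diatonicPitchClassesDictB.get? n1).bind fun dpc1 =>
    (diatonicPitchClassesDictB.get? n2).map fun dpc2 =>
      PySem.Int.mod (dpc2 - dpc1) 7 + 1)).getD 0

-- ===== PRECONDITION & SPEC =====
-- Pre_ excludes exactly the inputs where A raises: an empty string (IndexError on [0]) or a
-- first character outside "CDEFGAB" (KeyError in the dict lookup).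
def Pre_getDiatonicSteps (tonic : String) (toNote : String) : Prop :=
  tonic.toList.head? ∈ [some 'C', some 'D', some 'E', some 'F', some 'G', some 'A', some 'B'] ∧
  toNote.toList.head? ∈ [some 'C', some 'D', some 'E', some 'F', some 'G', some 'A', some 'B']
instance (tonic : String) (toNote : String) : Decidable (Pre_getDiatonicSteps tonic toNote) := by
  unfold Pre_getDiatonicSteps; infer_instance
def pvWitness_getDiatonicSteps : String × String := ("C", "G")

def Spec_getDiatonicSteps (tonic : String) (toNote : String) (out : Int) : Prop := out = getDiatonicSteps_alt tonic toNote
instance (tonic : String) (toNote : String) (out : Int) : Decidable (Spec_getDiatonicSteps tonic toNote out) := by unfold Spec_getDiatonicSteps; infer_instance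

-- ===== CLAIM (what is proved, stated in full; the proofs are below) =====
def Claim_equal_getDiatonicSteps : Prop := ∀ (tonic : String) (toNote : String), Dom_getDiatonicSteps tonic toNote → Pre_getDiatonicSteps tonic toNote → Spec_getDiatonicSteps tonic toNote (getDiatonicSteps tonic toNote)

-- ===== LEMMAS AND PROOFS =====
theorem head_mem_elim (s : String)
    (h : s.toList.head? ∈ [some 'C', some 'D', some 'E', some 'F', some 'G', some 'A', some 'B']) :
    ∃ c, s.toList.head? = some c ∧ c ∈ ['C','D','E','F','G','A','B'] := by
  simp only [List.mem_cons, List.not_mem_nil, or_false] at h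
  rcases h with h|h|h|h|h|h|h <;> exact ⟨_, h, by decide⟩

-- every letter of "CDEFGAB" has a dict value in [0,7)
theorem pcDict_get (c : Char) (hc : c ∈ ['C','D','E','F','G','A','B']) :
    ∃ v : Int, diatonicPitchClassesDict.get? c = some v ∧ 0 ≤ v ∧ v < 7 := by
  fin_cases hc
  · exact ⟨0, by decide, by decide, by decide⟩
  · exact ⟨1, by decide, by decide, by decide⟩
  · exact ⟨2, by decide, by decide, by decide⟩
  · exact ⟨3, by decide, by decide, by decide⟩
  · exact ⟨4, by decide, by decide, by decide⟩
  · exact ⟨5, by decide, by decide, by decide⟩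
  · exact ⟨6, by decide, by decide, by decide⟩

-- the fixed-fuel loop computes the forward modular distance
theorem loop_closed (d1 d2 : Int) (h1 : 0 ≤ d1) (h1' : d1 < 7) (h2 : 0 ≤ d2) (h2' : d2 < 7) :
    getDiatonicStepsLoop 7 d1 d2 0 = PySem.Int.mod (d2 - d1) 7 := by
  interval_cases d1 <;> interval_cases d2 <;> decide

-- ===== VERDICT (by name: the statement is the Claim_ definition above) =====
theorem getDiatonicSteps_spec : Claim_equal_getDiatonicSteps := by
  intro tonic toNote _ hpre
  obtain ⟨h1, h2⟩ := hpre
  obtain ⟨c1, hh1, hc1⟩ := head_mem_elim tonic h1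
  obtain ⟨c2, hh2, hc2⟩ := head_mem_elim toNote h2
  obtain ⟨v1, hv1, hv1l, hv1u⟩ := pcDict_get c1 hc1
  obtain ⟨v2, hv2, hv2l, hv2u⟩ := pcDict_get c2 hc2
  have g1 : PySem.Str.pyGet? tonic 0 = some c1 := by
    rw [show (0 : Int) = ((0 : Nat) : Int) from rfl, PySem.Str.pyGet?_natCast,
        ← List.head?_eq_getElem?]; exact hh1
  have g2 : PySem.Str.pyGet? toNote 0 = some c2 := by
    rw [show (0 : Int) = ((0 : Nat) : Int) from rfl, PySem.Str.pyGet?_natCast,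
        ← List.head?_eq_getElem?]; exact hh2
  have hvB1 : diatonicPitchClassesDictB.get? c1 = some v1 := hv1
  have hvB2 : diatonicPitchClassesDictB.get? c2 = some v2 := hv2
  unfold Spec_getDiatonicSteps getDiatonicSteps getDiatonicSteps_alt
  rw [g1, g2]
  simp only [hv1, hv2, Option.bind_some, hvB1, hvB2, Option.map_some, Option.getD_some]
  rw [loop_closed v1 v2 hv1l hv1u hv2l hv2u]
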